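-- pv_equiv track=rewrite | github.com/MichaelLesirge/leetcode | 0036_valid_sudoku.py | isInvalidSection
-- ===== SOURCE A (Python) =====
-- def isInvalidSection(array: list) -> bool:
--     seen = set()
--     for item in array:
--         if item == ".":
--             continue
--         if item in seen:
--             return True
--         seen.add(item)
--     return False
-- ===== SOURCE B (Python) =====
-- def isInvalidSection(array: list) -> bool:
--     filtered = [item for item in array if item != "."]
--     return len(filtered) != len(set(filtered))
-- ===== Notes on version B (the rewrite author's own statement) =====
-- stated objective: idiomatic
-- what changed: Replaces A's incremental seen-set loop with early return by one filtering comprehension followed by a set-cardinality comparison (len(filtered) != len(set(filtered))), with no per-item membership branch or early exit.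
import Mathlib
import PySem

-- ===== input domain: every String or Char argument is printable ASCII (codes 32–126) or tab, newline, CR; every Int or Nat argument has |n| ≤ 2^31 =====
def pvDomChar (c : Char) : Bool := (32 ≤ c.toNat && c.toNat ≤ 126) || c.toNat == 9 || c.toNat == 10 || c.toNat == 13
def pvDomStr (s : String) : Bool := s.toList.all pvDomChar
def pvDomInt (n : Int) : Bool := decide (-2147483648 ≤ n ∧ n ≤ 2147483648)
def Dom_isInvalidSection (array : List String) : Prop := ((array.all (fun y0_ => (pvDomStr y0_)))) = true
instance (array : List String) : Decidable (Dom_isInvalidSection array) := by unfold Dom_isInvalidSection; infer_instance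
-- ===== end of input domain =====

-- B replaces A's incremental seen-set loop (early return on a repeat) by filtering out "." and
-- comparing the filtered list's length with its set's length; idiomatic, same O(n) cost.

-- ===== PORT A =====
-- the 'for item in array' loop of A with its mutable 'seen' set and early 'return True'
def pvLoopA (array : List String) (seen : PySem.Set String) : Bool :=
  match array with
  | [] => false
  | item :: rest =>
    if item == "." then pvLoopA rest seen
    else if PySem.Set.contains seen item then true
    else pvLoopA rest (PySem.Set.add seen item)

def isInvalidSection (array : List String) : Bool :=
  pvLoopA array PySem.Set.empty

-- ===== PORT B =====
def isInvalidSection_alt (array : List String) : Bool :=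
  let filtered := array.filter (fun item => item != ".")
  decide (filtered.length ≠ (PySem.Set.ofList filtered).length)

-- ===== PRECONDITION & SPEC =====
def Spec_isInvalidSection (array : List String) (out : Bool) : Prop := out = isInvalidSection_alt array
instance (array : List String) (out : Bool) : Decidable (Spec_isInvalidSection array out) := by unfold Spec_isInvalidSection; infer_instance

-- ===== CLAIM (what is proved, stated in full; the proofs are below) =====
def Claim_equal_isInvalidSection : Prop := ∀ (array : List String), Dom_isInvalidSection array → Spec_isInvalidSection array (isInvalidSection array)

-- ===== LEMMAS AND PROOFS =====

-- A's loop returns false iff the non-dot items are pairwise distinct and disjoint from 'seen'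
theorem pvLoopA_false_iff (array : List String) (seen : PySem.Set String) :
    pvLoopA array seen = false ↔
      ((array.filter (fun item => item != ".")).Nodup ∧
        ∀ x ∈ array.filter (fun item => item != "."), x ∉ seen) := by
  induction array generalizing seen with
  | nil => simp [pvLoopA]
  | cons item rest ih =>
    by_cases hdot : item = "."
    · subst hdot
      simp only [pvLoopA, List.filter_cons]
      simp [ih seen]
    · by_cases hmem : item ∈ seen
      · simp only [pvLoopA, List.filter_cons]
        simp [hdot, hmem]
      · simp only [pvLoopA, List.filter_cons]
        have hc : (seen.contains item) = false := by
          simpa [PySem.Set.contains_eq_listContains] using hmem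
        simp only [if_neg (by simp [hdot] : ¬((item == ".") = true)), hc,
          if_pos (by simp [hdot] : ((item != ".") = true)), Bool.false_eq_true, if_false, ih,
          List.nodup_cons, List.mem_cons, PySem.Set.mem_add]
        constructor
        · rintro ⟨hnd, hdisj⟩
          have hnotin : item ∉ rest.filter (fun item => item != ".") := by
            intro hx
            exact (hdisj item hx) (Or.inr rfl)
          refine ⟨⟨hnotin, hnd⟩, ?_⟩
          rintro x (rfl | hx)
          · exact hmem
          · intro hs
            exact (hdisj x hx) (Or.inl hs)
        · rintro ⟨⟨hnotin, hnd⟩, hdisj⟩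
          refine ⟨hnd, ?_⟩
          rintro x hx (hs | rfl)
          · exact hdisj x (Or.inr hx) hs
          · exact hnotin hx

-- len(set(l)) = len(l) iff l has no duplicates
theorem pv_length_ofList_eq_iff (l : List String) :
    (PySem.Set.ofList l).length = l.length ↔ l.Nodup := by
  constructor
  · intro h
    induction l with
    | nil => simp
    | cons x xs ih =>
      rw [PySem.Set.ofList_cons] at h
      simp only [List.length_cons] at h
      by_cases hx : x ∈ PySem.Set.ofList xs
      · exfalso
        have hlt : ((PySem.Set.ofList xs).discard x).length < (PySem.Set.ofList xs).length := by
          unfold PySem.Set.discard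
          refine List.length_filter_lt_length_iff_exists.mpr ⟨x, hx, ?_⟩
          simp
        have hle := PySem.Set.length_ofList_le xs
        omega
      · have heq : ((PySem.Set.ofList xs).discard x).length = (PySem.Set.ofList xs).length := by
          unfold PySem.Set.discard
          rw [List.filter_eq_self.mpr]
          intro y hy
          have hne : y ≠ x := fun hyx => hx (hyx ▸ hy)
          simpa using hne
        rw [heq] at h
        have hxxs : x ∉ xs := fun hc => hx ((PySem.Set.mem_ofList xs x).mpr hc)
        exact List.nodup_cons.mpr ⟨hxxs, ih (by omega)⟩
  · intro h
    rw [PySem.Set.ofList_eq_self_of_nodup l h]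

-- ===== VERDICT (by name: the statement is the Claim_ definition above) =====
theorem isInvalidSection_spec : Claim_equal_isInvalidSection := by
  intro array _
  unfold Spec_isInvalidSection isInvalidSection isInvalidSection_alt
  rcases h : pvLoopA array PySem.Set.empty with _ | _
  · have hh := (pvLoopA_false_iff array PySem.Set.empty).mp h
    rw [eq_comm, decide_eq_false_iff_not]
    intro hne
    exact hne ((pv_length_ofList_eq_iff _).mpr hh.1).symm
  · rw [eq_comm, decide_eq_true_iff]
    intro heq
    have hnd := (pv_length_ofList_eq_iff _).mp heq.symm
    have hfalse : pvLoopA array PySem.Set.empty = false :=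
      (pvLoopA_false_iff array PySem.Set.empty).mpr ⟨hnd, by simp [PySem.Set.empty]⟩
    rw [h] at hfalse; cases hfalse
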